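-- pv_equiv track=rewrite | github.com/MichaelBlackwell/BidFoundry | agents/orchestrator/synthesis.py | _determine_section_order
-- ===== SOURCE A (Python) =====
-- from typing import List, Dict, Optional, Any, Set
--
-- def _determine_section_order(section_names: Any) -> List[str]:
--     """
--     Determine the order of sections in the final document.
--
--     Uses standard GovCon document ordering conventions.
--     """
--     # Standard section ordering for GovCon documents
--     standard_order = [
--         # Common to most documents
--         "Executive Summary",
--         "Company Overview",
--         "Introduction",
--
--         # Capability Statement
--         "Core Competencies",
--         "Core Capabilities",
--         "Differentiators",
--         "Past Performance",
--         "Certifications",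
--
--         # SWOT Analysis
--         "Strengths",
--         "Weaknesses",
--         "Opportunities",
--         "Threats",
--         "SWOT Summary",
--
--         # Competitive Analysis
--         "Market Overview",
--         "Market Analysis",
--         "Competitive Landscape",
--         "Competitor Analysis",
--         "Competitive Position",
--
--         # Proposal Strategy
--         "Technical Approach",
--         "Management Approach",
--         "Win Themes",
--         "Win Strategy",
--         "Discriminators",
--         "Ghost Team Analysis",
--         "Price Strategy",
--         "Risk Analysis",
--         "Risk Mitigation",
--
--         # Go-to-Market
--         "Target Market",
--         "Target Agencies",
--         "Value Proposition",
--         "Marketing Strategy",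
--         "Capture Strategy",
--         "Partnership Strategy",
--
--         # Teaming Strategy
--         "Teaming Approach",
--         "Partner Criteria",
--         "Potential Partners",
--         "Team Structure",
--
--         # BD Pipeline
--         "Pipeline Overview",
--         "Active Opportunities",
--         "Forecast",
--         "Resource Requirements",
--
--         # Common endings
--         "Recommendations",
--         "Next Steps",
--         "Conclusion",
--         "Appendices",
--     ]
--
--     # Return sections in order, maintaining any that aren't in standard order
--     ordered = []
--     remaining = set(section_names)
--
--     for standard_section in standard_order:
--         if standard_section in remaining:
--             ordered.append(standard_section)
--             remaining.remove(standard_section)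
--
--     # Append any non-standard sections at the end
--     ordered.extend(sorted(remaining))
--
--     return ordered
-- ===== SOURCE B (Python) =====
-- def _determine_section_order(section_names):
--     standard_order = [
--         "Executive Summary", "Company Overview", "Introduction",
--         "Core Competencies", "Core Capabilities", "Differentiators",
--         "Past Performance", "Certifications",
--         "Strengths", "Weaknesses", "Opportunities", "Threats", "SWOT Summary",
--         "Market Overview", "Market Analysis", "Competitive Landscape",
--         "Competitor Analysis", "Competitive Position",
--         "Technical Approach", "Management Approach", "Win Themes", "Win Strategy",
--         "Discriminators", "Ghost Team Analysis", "Price Strategy",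
--         "Risk Analysis", "Risk Mitigation",
--         "Target Market", "Target Agencies", "Value Proposition",
--         "Marketing Strategy", "Capture Strategy", "Partnership Strategy",
--         "Teaming Approach", "Partner Criteria", "Potential Partners", "Team Structure",
--         "Pipeline Overview", "Active Opportunities", "Forecast", "Resource Requirements",
--         "Recommendations", "Next Steps", "Conclusion", "Appendices",
--     ]
--     rank = {name: i for i, name in enumerate(standard_order)}
--     n = len(standard_order)
--     return sorted(set(section_names), key=lambda s: (rank.get(s, n), s))
-- ===== Notes on version B (the rewrite author's own statement) =====
-- stated objective: idiomatic
-- what changed: A's membership-scan loop over the 45-name convention list (filter + set removal, then a separate sort of the leftovers) is replaced by one keyed sort of the deduplicated input under the tuple key (rank-in-convention or 45, name), built from a rank dict.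
import Mathlib
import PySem

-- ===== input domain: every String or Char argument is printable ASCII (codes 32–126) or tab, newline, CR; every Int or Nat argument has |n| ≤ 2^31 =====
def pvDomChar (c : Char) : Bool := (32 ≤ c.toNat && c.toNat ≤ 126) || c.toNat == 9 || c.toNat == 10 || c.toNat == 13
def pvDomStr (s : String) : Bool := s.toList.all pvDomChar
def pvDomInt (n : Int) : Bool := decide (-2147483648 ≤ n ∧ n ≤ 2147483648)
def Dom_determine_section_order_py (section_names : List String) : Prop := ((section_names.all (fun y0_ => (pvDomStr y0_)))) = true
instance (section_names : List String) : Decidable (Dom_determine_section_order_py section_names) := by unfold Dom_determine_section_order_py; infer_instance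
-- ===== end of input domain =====

-- B replaces A's scan over the 45-name convention list with one keyed sort of the
-- deduplicated input under the key (rank-in-convention-or-45, name) — 'idiomatic' objective.

-- ===== PORT A =====
-- the module-level standard_order list, shared verbatim by both Pythons
def pvStd : List String := [
  "Executive Summary", "Company Overview", "Introduction",
  "Core Competencies", "Core Capabilities", "Differentiators",
  "Past Performance", "Certifications",
  "Strengths", "Weaknesses", "Opportunities", "Threats", "SWOT Summary",
  "Market Overview", "Market Analysis", "Competitive Landscape",
  "Competitor Analysis", "Competitive Position",
  "Technical Approach", "Management Approach", "Win Themes", "Win Strategy",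
  "Discriminators", "Ghost Team Analysis", "Price Strategy",
  "Risk Analysis", "Risk Mitigation",
  "Target Market", "Target Agencies", "Value Proposition",
  "Marketing Strategy", "Capture Strategy", "Partnership Strategy",
  "Teaming Approach", "Partner Criteria", "Potential Partners", "Team Structure",
  "Pipeline Overview", "Active Opportunities", "Forecast", "Resource Requirements",
  "Recommendations", "Next Steps", "Conclusion", "Appendices"]

-- A's loop body: if standard_section in remaining: ordered.append(...); remaining.remove(...)
-- (remove is guarded by the membership test, so it never raises; under that guard it equals Set.discard)
def pvStepA (st : List String × PySem.Set String) (sec : String) : List String × PySem.Set String :=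
  if PySem.Set.contains st.2 sec then (st.1 ++ [sec], PySem.Set.discard st.2 sec) else st

def determine_section_order_py (section_names : List String) : List String :=
  let st := pvStd.foldl pvStepA ([], PySem.Set.ofList section_names)
  -- ordered.extend(sorted(remaining)); return ordered
  st.1 ++ PySem.List.sorted st.2 (fun x => x)

-- ===== PORT B =====
-- rank = {name: i for i, name in enumerate(standard_order)}
def pvRank : PySem.Dict String Int :=
  (PySem.List.enumerate pvStd).foldl (fun d p => PySem.Dict.insert d p.2 p.1) PySem.Dict.empty

def determine_section_order_py_alt (section_names : List String) : List String :=
  -- sorted(set(section_names), key=lambda s: (rank.get(s, n), s))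
  PySem.List.sorted2 (PySem.Set.ofList section_names)
    (fun s => PySem.Dict.getD pvRank s (pvStd.length : Int)) (fun s => s)

-- ===== PRECONDITION & SPEC =====
def Spec_determine_section_order_py (section_names : List String) (out : List String) : Prop := out = determine_section_order_py_alt section_names
instance (section_names : List String) (out : List String) : Decidable (Spec_determine_section_order_py section_names out) := by unfold Spec_determine_section_order_py; infer_instance

-- ===== CLAIM (what is proved, stated in full; the proofs are below) =====
def Claim_equal_determine_section_order_py : Prop := ∀ (section_names : List String), Dom_determine_section_order_py section_names → Spec_determine_section_order_py section_names (determine_section_order_py section_names)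

-- ===== LEMMAS AND PROOFS =====

-- sorted2 with keys (k1, k2) is sorted with the lexicographic key toLex (k1 x, k2 x)
theorem pv_sorted2_eq_sorted_lex {α κ₁ κ₂ : Type} [LinearOrder κ₁] [LinearOrder κ₂]
    (xs : List α) (k1 : α → κ₁) (k2 : α → κ₂) :
    PySem.List.sorted2 xs k1 k2 = PySem.List.sorted xs (fun x => toLex (k1 x, k2 x)) := by
  show xs.foldl (fun acc x => PySem.List.insertBy (fun a b => decide (k1 a < k1 b) || (!decide (k1 b < k1 a) && decide (k2 a < k2 b))) x acc) []
     = xs.foldl (fun acc x => PySem.List.insertBy (fun a b => decide (toLex (k1 a, k2 a) < toLex (k1 b, k2 b))) x acc) []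
  congr 1
  funext acc c
  congr 1
  funext a b
  simp only [Prod.Lex.lt_iff, ofLex_toLex]
  by_cases h1 : k1 a < k1 b
  · simp [h1]
  · by_cases h2 : k1 b < k1 a
    · simp [h1, h2, (lt_iff_le_and_ne.mp h2).2.symm]
    · have he : k1 a = k1 b := le_antisymm (not_lt.mp h2) (not_lt.mp h1)
      by_cases h3 : k2 a < k2 b <;> simp [h3, he]

-- the rank dict looks up the index in pvStd (or the default for a non-standard name)
theorem pv_rank_fold (l : List String) (hl : l.Nodup) (k : Int) (d : PySem.Dict String Int)
    (s : String) (dflt : Int) :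
    PySem.Dict.getD ((PySem.List.enumerate l k).foldl (fun d p => PySem.Dict.insert d p.2 p.1) d) s dflt
      = if s ∈ l then k + (List.idxOf s l : Int) else PySem.Dict.getD d s dflt := by
  induction l generalizing k d with
  | nil => simp [PySem.List.enumerate]
  | cons x t ih =>
    simp only [List.nodup_cons] at hl
    rw [PySem.List.enumerate_cons]
    simp only [List.foldl_cons]
    rw [ih hl.2]
    by_cases hx : s = x
    · subst hx
      simp [hl.1, List.idxOf_cons_self]
    · by_cases ht : s ∈ t
      · rw [List.idxOf_cons_ne t (Ne.symm hx)]
        simp [hx, ht]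
        ring
      · simp [hx, ht, PySem.Dict.getD_insert]

theorem pv_rank_getD (s : String) (dflt : Int) :
    PySem.Dict.getD pvRank s dflt = if s ∈ pvStd then (List.idxOf s pvStd : Int) else dflt := by
  have hn : pvStd.Nodup := by decide
  unfold pvRank
  rw [pv_rank_fold pvStd hn 0 PySem.Dict.empty s dflt]
  split <;> simp [PySem.Dict.getD, PySem.Dict.get?, PySem.Dict.empty]

-- A's loop over the convention list, characterised: it filters the convention list by
-- membership in the remaining set and filters the set down to the non-standard names
theorem pv_loopA (std : List String) (hstd : std.Nodup) (acc S : List String) :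
    std.foldl pvStepA (acc, S)
      = (acc ++ std.filter (fun s => S.contains s), S.filter (fun x => !std.contains x)) := by
  induction std generalizing acc S with
  | nil => simp
  | cons x t ih =>
    simp only [List.nodup_cons] at hstd
    simp only [List.foldl_cons]
    by_cases hx : S.contains x = true
    · have hxm : x ∈ S := by simpa [List.contains_eq_mem] using hx
      have hstep : pvStepA (acc, S) x = (acc ++ [x], PySem.Set.discard S x) := by
        simp [pvStepA, PySem.Set.contains, List.contains_eq_mem, hxm]
      rw [hstep, ih hstd.2]
      have h1 : List.filter (fun s => List.contains (PySem.Set.discard S x) s) t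
              = List.filter (fun s => S.contains s) t := by
        apply List.filter_congr
        intro s hs
        have hsx : s ≠ x := fun h => hstd.1 (h ▸ hs)
        simp [PySem.Set.discard, List.contains_eq_mem, List.mem_filter, hsx]
      have h2 : List.filter (fun y => !t.contains y) (PySem.Set.discard S x)
              = List.filter (fun y => !(x :: t).contains y) S := by
        simp only [PySem.Set.discard, List.filter_filter]
        apply List.filter_congr
        intro y _
        simp only [List.contains_eq_mem, List.mem_cons]
        by_cases hyx : y = x <;> simp [hyx]
      rw [h1, h2, List.filter_cons_of_pos hx, List.append_assoc]
      rfl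
    · have hxm : x ∉ S := by simpa [List.contains_eq_mem] using hx
      have hstep : pvStepA (acc, S) x = (acc, S) := by
        simp [pvStepA, PySem.Set.contains, List.contains_eq_mem, hxm]
      rw [hstep, ih hstd.2, List.filter_cons_of_neg (by simpa using hx)]
      have h2 : List.filter (fun y => !t.contains y) S = List.filter (fun y => !(x :: t).contains y) S := by
        apply List.filter_congr
        intro y hy
        have hyx : y ≠ x := fun h => hxm (h ▸ hy)
        simp [List.contains_eq_mem, hyx]
      rw [h2]

-- ===== VERDICT (by name: the statement is the Claim_ definition above) =====
theorem determine_section_order_py_spec : Claim_equal_determine_section_order_py := by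
  intro xs _
  unfold Spec_determine_section_order_py determine_section_order_py determine_section_order_py_alt
  have hstd : pvStd.Nodup := by decide
  rw [pv_loopA pvStd hstd [] (PySem.Set.ofList xs), pv_sorted2_eq_sorted_lex]
  set S : List String := PySem.Set.ofList xs with hS
  set key : String → Lex (Int × String) :=
    fun s => toLex (PySem.Dict.getD pvRank s (pvStd.length : Int), s) with hkey
  have hSnd : S.Nodup := PySem.Set.nodup_ofList xs
  set P1 : List String := pvStd.filter (fun s => S.contains s) with hP1
  set E : List String := S.filter (fun y => !pvStd.contains y) with hE
  set E' : List String := PySem.List.sorted E (fun x => x) with hE'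
  simp only [List.nil_append]
  -- key evaluates to (index-in-pvStd, s) on standard names and (45, s) on others
  have hk_in : ∀ s ∈ pvStd, PySem.Dict.getD pvRank s (pvStd.length : Int) = (List.idxOf s pvStd : Int) := by
    intro s hs; rw [pv_rank_getD, if_pos hs]
  have hk_out : ∀ s, s ∉ pvStd → PySem.Dict.getD pvRank s (pvStd.length : Int) = (pvStd.length : Int) := by
    intro s hs; rw [pv_rank_getD, if_neg hs]
  -- the left-hand list is a permutation of S
  have hperm : (P1 ++ E').Perm S := by
    have hp1 : P1.Perm (S.filter (fun y => pvStd.contains y)) := by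
      rw [List.perm_ext_iff_of_nodup (hstd.filter _) (hSnd.filter _)]
      intro a
      rw [List.mem_filter, List.mem_filter]
      simp only [List.contains_eq_mem, decide_eq_true_eq]
      exact and_comm
    have he' : E'.Perm E := PySem.List.sorted_perm E (fun x => x) false
    exact ((hp1.append he').trans (List.filter_append_perm _ S))
  -- and it is strictly increasing under the key
  have hpair : (P1 ++ E').Pairwise (fun a b => key a < key b) := by
    rw [List.pairwise_append]
    refine ⟨?_, ?_, ?_⟩
    · -- standard names, in convention order: first key components strictly increase
      apply List.Pairwise.filter
      rw [List.pairwise_iff_getElem]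
      intro i j hi hj hij
      have ha := hk_in pvStd[i] (List.getElem_mem hi)
      have hb := hk_in pvStd[j] (List.getElem_mem hj)
      rw [hkey]
      simp only [Prod.Lex.lt_iff, ofLex_toLex]
      left
      rw [ha, hb, hstd.idxOf_getElem i hi, hstd.idxOf_getElem j hj]
      exact_mod_cast hij
    · -- non-standard names: equal first components, names strictly increase
      have hElt : E'.Pairwise (fun a b : String => a < b) := by
        have hEnd : E.Nodup := hSnd.filter _
        have : E' = PySem.List.sorted (PySem.Set.ofList E) (fun x => x) := by
          rw [PySem.Set.ofList_eq_self_of_nodup E hEnd]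
        rw [this]
        exact PySem.List.sorted_ofList_pairwise_lt E
      have hmem : ∀ a ∈ E', a ∉ pvStd := by
        intro a ha
        have : a ∈ E := (PySem.List.mem_sorted E (fun x => x) false a).mp ha
        rw [List.mem_filter] at this
        simpa using this.2
      rw [List.pairwise_iff_getElem] at hElt ⊢
      intro i j hi hj hij
      have ha := hk_out E'[i] (hmem _ (List.getElem_mem hi))
      have hb := hk_out E'[j] (hmem _ (List.getElem_mem hj))
      rw [hkey]
      simp only [Prod.Lex.lt_iff, ofLex_toLex]
      right
      exact ⟨ha.trans hb.symm, hElt i j hi hj hij⟩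
    · -- every standard name sorts before every non-standard one
      intro a ha b hb
      have haStd : a ∈ pvStd := (List.mem_filter.mp ha).1
      have hbOut : b ∉ pvStd := by
        have : b ∈ E := (PySem.List.mem_sorted E (fun x => x) false b).mp hb
        rw [List.mem_filter] at this
        simpa using this.2
      rw [hkey]
      simp only [Prod.Lex.lt_iff, ofLex_toLex]
      left
      rw [hk_in a haStd, hk_out b hbOut]
      exact_mod_cast List.idxOf_lt_length_of_mem haStd
  exact (PySem.List.sorted_eq_of_perm_of_pairwise_lt S (P1 ++ E') key hperm hpair).symm
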